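-- pv_equiv track=rewrite | github.com/iGame-Lab/TS-VIS | zjvis/backend/backend/api/utils.py | get_classified_label
-- ===== SOURCE A (Python) =====
-- def get_classified_label(tags):
--     category = {}
--     for tag in tags:
--         # 使用斜杠分割类别
--         i = tag.find('/')
--         _cate_name = tag[0:] if i == -1 else tag[0:i]
--         if _cate_name not in category.keys():
--             category[_cate_name] = [tag]
--         else:
--             category[_cate_name].append(tag)
--     return category
-- ===== SOURCE B (Python) =====
-- def get_classified_label(tags):
--     def prefix(t):
--         i = t.find('/')
--         return t if i == -1 else t[:i]
--     cats = []
--     for t in tags: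
--         c = prefix(t)
--         if c not in cats:
--             cats.append(c)
--     return {c: [t for t in tags if prefix(t) == c] for c in cats}
-- ===== Notes on version B (the rewrite author's own statement) =====
-- stated objective: alternative
-- what changed: Replaces the single accumulating dict pass (insert-or-append per tag) with an index-then-filter shape: one pass collects the distinct category prefixes in first-appearance order, then a dict comprehension re-scans tags once per category to build each group.
import Mathlib
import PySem

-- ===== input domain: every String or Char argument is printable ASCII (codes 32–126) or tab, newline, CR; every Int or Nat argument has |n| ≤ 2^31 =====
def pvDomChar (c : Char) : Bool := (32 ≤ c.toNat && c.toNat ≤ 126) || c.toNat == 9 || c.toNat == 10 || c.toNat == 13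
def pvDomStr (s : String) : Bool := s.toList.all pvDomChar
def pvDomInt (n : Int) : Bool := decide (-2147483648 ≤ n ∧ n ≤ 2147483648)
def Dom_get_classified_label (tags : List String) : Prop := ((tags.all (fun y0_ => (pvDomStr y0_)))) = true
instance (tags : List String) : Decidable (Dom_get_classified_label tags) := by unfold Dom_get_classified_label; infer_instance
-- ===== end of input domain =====

-- B replaces A's single accumulating dict pass with an index-then-filter decomposition:
-- collect the distinct slash-prefixes in first-appearance order, then build each group by
-- re-filtering the tag list (alternative decomposition, same return value).


-- ===== PORT A =====
def get_classified_label (tags : List String) : List (String × List String) :=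
  (tags.foldl (fun category tag =>
    let i := PySem.Str.find tag "/"
    let _cate_name := if i = -1 then PySem.Str.slice tag (some 0) none
                      else PySem.Str.slice tag (some 0) (some i)
    if ¬ (category.contains _cate_name = true) then
      category.insert _cate_name [tag]
    else
      category.modify _cate_name [] (fun v => v ++ [tag])) PySem.Dict.empty).items

-- ===== PORT B =====
def pvPrefix (t : String) : String :=
  let i := PySem.Str.find t "/"
  if i = -1 then t else PySem.Str.slice t (some 0) (some i)

def get_classified_label_alt (tags : List String) : List (String × List String) :=
  let cats := tags.foldl (fun cats t =>
    let c := pvPrefix t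
    if cats.contains c then cats else cats ++ [c]) []
  cats.map (fun c => (c, tags.filter (fun t => pvPrefix t == c)))

-- ===== PRECONDITION & SPEC =====
def Spec_get_classified_label (tags : List String) (out : List (String × List String)) : Prop := out = get_classified_label_alt tags
instance (tags : List String) (out : List (String × List String)) : Decidable (Spec_get_classified_label tags out) := by unfold Spec_get_classified_label; infer_instance

-- ===== CLAIM (what is proved, stated in full; the proofs are below) =====
def Claim_equal_get_classified_label : Prop := ∀ (tags : List String), Dom_get_classified_label tags → Spec_get_classified_label tags (get_classified_label tags)

-- ===== LEMMAS AND PROOFS =====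

-- tag[0:] is tag
lemma pvSlice_zero_none (t : String) : PySem.Str.slice t (some 0) none = t := by
  simp [PySem.Str.slice]

-- A's inline category-name computation is B's pvPrefix
lemma pvKey_eq (t : String) :
    (if PySem.Str.find t "/" = -1 then PySem.Str.slice t (some 0) none
     else PySem.Str.slice t (some 0) (some (PySem.Str.find t "/"))) = pvPrefix t := by
  simp only [pvPrefix]
  split_ifs
  · exact pvSlice_zero_none t
  · rfl

-- A's branch (insert-if-new / append-if-present) is exactly Dict.modify with default []
lemma pvStep_eq_modify (d : PySem.Dict String (List String)) (c t : String) :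
    (if ¬ (d.contains c = true) then d.insert c [t] else d.modify c [] (fun v => v ++ [t]))
      = d.modify c [] (fun v => v ++ [t]) := by
  by_cases h : d.contains c = true
  · simp [h]
  · simp [h, PySem.Dict.modify,
      PySem.Dict.getD_of_not_contains d ([] : List String) (by simpa using h)]

-- B's category-collecting fold is PySem.Set.ofList of the prefixes
lemma pvCats_eq (tags : List String) :
    tags.foldl (fun cats t =>
      let c := pvPrefix t
      if cats.contains c then cats else cats ++ [c]) []
    = PySem.Set.ofList (tags.map pvPrefix) := by
  rw [← PySem.Set.update_nil_left, PySem.Set.update_map_eq_foldl_add]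
  rfl

-- ===== VERDICT (by name: the statement is the Claim_ definition above) =====

theorem get_classified_label_spec : Claim_equal_get_classified_label := by
  intro tags _
  unfold Spec_get_classified_label get_classified_label get_classified_label_alt
  simp only [pvKey_eq, pvStep_eq_modify, pvCats_eq]
  have hkeys : (tags.foldl (fun d t => d.modify (pvPrefix t) [] (fun v => v ++ [t]))
      PySem.Dict.empty).keys = PySem.Set.ofList (tags.map pvPrefix) := by
    rw [PySem.Dict.keys_foldl_modify_key tags pvPrefix [] (fun _ t v => v ++ [t])]
    exact PySem.Set.update_nil_left _
  have hnodup : (tags.foldl (fun d t => d.modify (pvPrefix t) [] (fun v => v ++ [t]))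
      PySem.Dict.empty).keys.Nodup :=
    PySem.Dict.nodup_keys_foldl_modify_key tags pvPrefix [] (fun _ t v => v ++ [t])
      PySem.Dict.empty (by simp)
  rw [PySem.Dict.items_eq_map_keys _ hnodup [], hkeys]
  refine List.map_congr_left (fun c _ => ?_)
  have hfold : tags.foldl (fun d t => d.modify (pvPrefix t) [] (fun v => v ++ [t]))
      PySem.Dict.empty
      = (tags.map (fun t => (pvPrefix t, t))).foldl
          (fun d p => d.modify p.1 [] (fun v => v ++ [p.2])) PySem.Dict.empty := by
    rw [List.foldl_map]
  rw [hfold, PySem.Dict.getD_foldl_modify_append]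
  simp [List.filter_map, Function.comp_def]
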